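-- pv_equiv track=rewrite | github.com/russmckendrick/russmckendrick | scripts/render_blog_svg.py | wrap_title
-- ===== SOURCE A (Python) =====
-- def wrap_title(text: str, per_line: int, max_lines: int = 2) -> list[str]:
--     words = text.split()
--     lines: list[str] = []
--     current = ""
--     i = 0
--     while i < len(words) and len(lines) < max_lines:
--         word = words[i]
--         candidate = (current + " " + word).strip() if current else word
--         if len(candidate) <= per_line:
--             current = candidate
--             i += 1
--         elif current:
--             lines.append(current)
--             current = ""
--         else:
--             lines.append(word[: per_line - 1] + "…")
--             i += 1
--     if current and len(lines) < max_lines: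
--         lines.append(current)
--     if i < len(words) and lines:
--         last = lines[-1]
--         if len(last) > per_line - 1:
--             last = last[: per_line - 1].rstrip()
--         lines[-1] = last + "…"
--     return lines or [text[:per_line]]
-- ===== SOURCE B (Python) =====
-- def wrap_title(text: str, per_line: int, max_lines: int = 2) -> list[str]:
--     # Phase 1: greedily wrap ALL words, with no line limit.
--     full: list[str] = []
--     current = ""
--     for word in text.split():
--         if current:
--             candidate = (current + " " + word).strip()
--             if len(candidate) <= per_line:
--                 current = candidate
--                 continue
--             full.append(current)
--             current = ""
--         # place word on a fresh line
--         if len(word) <= per_line: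
--             current = word
--         else:
--             full.append(word[: per_line - 1] + "…")
--     if current:
--         full.append(current)
--     # Phase 2: keep at most max_lines lines, ellipsising the last kept line.
--     if max_lines <= 0:
--         kept: list[str] = []
--     elif len(full) > max_lines:
--         kept = full[:max_lines]
--         last = kept[-1]
--         if len(last) > per_line - 1:
--             last = last[: per_line - 1].rstrip()
--         kept[-1] = last + "…"
--     else:
--         kept = full
--     return kept or [text[:per_line]]
-- ===== Notes on version B (the rewrite author's own statement) =====
-- stated objective: alternative
-- what changed: B splits A's single interleaved loop into two phases: one greedy pass that wraps ALL words with no line limit, then a separate truncation pass that keeps at most max_lines lines and applies the trailing-ellipsis rule to the last kept line.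
import Mathlib
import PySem

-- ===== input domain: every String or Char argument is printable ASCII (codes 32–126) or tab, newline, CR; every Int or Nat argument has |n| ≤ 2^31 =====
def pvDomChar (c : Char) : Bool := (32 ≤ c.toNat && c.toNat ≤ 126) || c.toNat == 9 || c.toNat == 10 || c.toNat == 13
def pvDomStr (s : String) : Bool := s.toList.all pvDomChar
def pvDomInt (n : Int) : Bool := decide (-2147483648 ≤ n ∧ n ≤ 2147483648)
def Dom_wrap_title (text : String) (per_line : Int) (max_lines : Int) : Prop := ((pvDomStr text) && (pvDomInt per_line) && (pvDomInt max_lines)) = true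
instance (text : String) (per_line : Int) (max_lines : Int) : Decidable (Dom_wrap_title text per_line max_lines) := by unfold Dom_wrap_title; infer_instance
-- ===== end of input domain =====

-- B separates the greedy word-wrap of ALL words from the max_lines truncation (two phases)
-- instead of A's single loop that interleaves the line limit with the wrapping; same cost, clearer structure.

-- ===== PORT A =====

-- `word[:per_line-1] + "…"` (the over-long-word break, identical text in both Pythons)
def wtBreak (per : Int) (w : List Char) : List Char :=
  PySem.List.slice w none (some (per - 1)) ++ ['…']

-- the trailing-ellipsis fix-up both Pythons apply to the last line:
-- `last = lines[-1]; if len(last) > per_line - 1: last = last[:per_line-1].rstrip(); lines[-1] = last + "…"`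
def truncEllipsis (per : Int) (lines : List (List Char)) : List (List Char) :=
  let last := PySem.List.pyGetD lines (-1) ([] : List Char)
  let last2 := if per - 1 < (last.length : Int) then
      PySem.Chars.rstrip (PySem.List.slice last none (some (per - 1)))
    else last
  lines.dropLast ++ [last2 ++ ['…']]

-- `(current + " " + word).strip() if current else word`
def wtCand (current w : List Char) : List Char :=
  if current ≠ [] then PySem.Chars.strip (current ++ ' ' :: w) else w

-- A's while loop over (i, lines, current); the remaining suffix of `words` stands for i,
-- returned third so the post-loop test `i < len(words)` becomes `rem ≠ []`.
def wtLoopA (per max : Int) (ws lines : List (List Char)) (current : List Char) :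
    List (List Char) × List Char × List (List Char) :=
  match ws with
  | [] => (lines, current, [])
  | w :: ws' =>
    if (lines.length : Int) < max then
      if ((wtCand current w).length : Int) ≤ per then wtLoopA per max ws' lines (wtCand current w)
      else if current ≠ [] then wtLoopA per max (w :: ws') (lines ++ [current]) []
      else wtLoopA per max ws' (lines ++ [wtBreak per w]) current
    else (lines, current, w :: ws')
termination_by 2 * ws.length + (if current = [] then 0 else 1)
decreasing_by
  · simp only [List.length_cons]; split_ifs <;> omega
  · simp only [List.length_cons]
    rw [if_pos trivial, if_neg ‹current ≠ []›]
    omega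
  · simp only [List.length_cons]; split_ifs <;> omega

-- A's two post-loop statements (`if current and len(lines) < max_lines: …` and the ellipsis fix)
def wtLines2 (max : Int) (r : List (List Char) × List Char × List (List Char)) :
    List (List Char) :=
  if r.2.1 ≠ [] ∧ (r.1.length : Int) < max then r.1 ++ [r.2.1] else r.1

def wtFinishA (per max : Int) (r : List (List Char) × List Char × List (List Char)) :
    List (List Char) :=
  if r.2.2 ≠ [] ∧ wtLines2 max r ≠ [] then truncEllipsis per (wtLines2 max r)
  else wtLines2 max r

def wrap_title (text : String) (per_line : Int) (max_lines : Int) : List String :=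
  let words := PySem.Chars.split₀ text.toList
  let lines3 := wtFinishA per_line max_lines (wtLoopA per_line max_lines words [] [])
  if lines3 ≠ [] then lines3.map String.ofList
  else [PySem.Str.slice text none (some per_line)]

-- ===== PORT B =====

-- Source B phase 1: greedy wrap of ALL words (no line limit); the `for word in words` loop.
def wtWrapAll (per : Int) (ws : List (List Char)) (current : List Char) : List (List Char) :=
  match ws with
  | [] => if current ≠ [] then [current] else []
  | w :: ws' =>
    if current ≠ [] then
      if ((PySem.Chars.strip (current ++ ' ' :: w)).length : Int) ≤ per then
        wtWrapAll per ws' (PySem.Chars.strip (current ++ ' ' :: w))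
      else current ::
        (if (w.length : Int) ≤ per then wtWrapAll per ws' w
         else wtBreak per w :: wtWrapAll per ws' [])
    else
      if (w.length : Int) ≤ per then wtWrapAll per ws' w
      else wtBreak per w :: wtWrapAll per ws' []

-- Source B phase 2: keep at most max_lines lines, ellipsising the last kept line
def wtFinishB (per max : Int) (full : List (List Char)) : List (List Char) :=
  if max ≤ 0 then []
  else if max < (full.length : Int) then
    truncEllipsis per (PySem.List.slice full none (some max))
  else full

def wrap_title_alt (text : String) (per_line : Int) (max_lines : Int) : List String :=
  let full := wtWrapAll per_line (PySem.Chars.split₀ text.toList) []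
  let kept := wtFinishB per_line max_lines full
  if kept ≠ [] then kept.map String.ofList
  else [PySem.Str.slice text none (some per_line)]

-- ===== PRECONDITION & SPEC =====
def Spec_wrap_title (text : String) (per_line : Int) (max_lines : Int) (out : List String) : Prop := out = wrap_title_alt text per_line max_lines
instance (text : String) (per_line : Int) (max_lines : Int) (out : List String) : Decidable (Spec_wrap_title text per_line max_lines out) := by unfold Spec_wrap_title; infer_instance

-- ===== CLAIM (what is proved, stated in full; the proofs are below) =====
def Claim_equal_wrap_title : Prop := ∀ (text : String) (per_line : Int) (max_lines : Int), Dom_wrap_title text per_line max_lines → Spec_wrap_title text per_line max_lines (wrap_title text per_line max_lines)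

-- ===== LEMMAS AND PROOFS =====

-- every word produced by str.split() is nonempty and contains no whitespace character
def wtGood (ws : List (List Char)) : Prop :=
  ∀ w ∈ ws, w ≠ [] ∧ ∀ c ∈ w, PySem.Chars.isspace c = false

lemma wtGood_go (s cur : List Char) (acc : List (List Char))
    (hacc : wtGood acc) (hcur : ∀ c ∈ cur, PySem.Chars.isspace c = false) :
    wtGood (PySem.Chars.split₀.go s cur acc) := by
  induction s generalizing cur acc with
  | nil =>
    rw [PySem.Chars.split₀.go]
    split_ifs with h
    · intro w hw; exact hacc w (List.mem_reverse.mp hw)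
    · intro w hw
      rcases List.mem_cons.mp (List.mem_reverse.mp hw) with h1 | h2
      · subst h1
        constructor
        · simp only [ne_eq, List.reverse_eq_nil_iff]
          simpa [List.isEmpty_iff] using h
        · intro c hc; exact hcur c (List.mem_reverse.mp hc)
      · exact hacc w h2
  | cons c rest ih =>
    rw [PySem.Chars.split₀.go]
    split_ifs with h1 h2
    · exact ih [] acc hacc (by simp)
    · refine ih [] (cur.reverse :: acc) ?_ (by simp)
      intro w hw
      rcases List.mem_cons.mp hw with h3 | h4
      · subst h3
        refine ⟨by simpa [List.isEmpty_iff] using h2, ?_⟩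
        intro d hd; exact hcur d (List.mem_reverse.mp hd)
      · exact hacc w h4
    · refine ih (c :: cur) acc hacc ?_
      intro d hd
      rcases List.mem_cons.mp hd with h3 | h4
      · subst h3; simpa using h1
      · exact hcur d h4

lemma wtGood_split₀ (s : List Char) : wtGood (PySem.Chars.split₀ s) := by
  unfold PySem.Chars.split₀
  exact wtGood_go s [] [] (by intro w hw; cases hw) (by simp)

lemma dropWhile_exists {α : Type} (p : α → Bool) (l : List α) (x : α)
    (hx : x ∈ l) (hpx : p x = false) : x ∈ l.dropWhile p := by
  have h := List.takeWhile_append_dropWhile (l := l) (p := p)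
  rw [← h] at hx
  rcases List.mem_append.mp hx with h1 | h1
  · exact absurd (List.mem_takeWhile_imp h1) (by simp [hpx])
  · exact h1

lemma strip_ne_nil (l : List Char) (x : Char) (hx : x ∈ l)
    (hpx : PySem.Chars.isspace x = false) : PySem.Chars.strip l ≠ [] := by
  unfold PySem.Chars.strip PySem.Chars.lstrip PySem.Chars.rstrip
  have h1 : x ∈ List.dropWhile PySem.Chars.isspace l := dropWhile_exists _ l x hx hpx
  have h2 : x ∈ List.dropWhile PySem.Chars.isspace
      (List.dropWhile PySem.Chars.isspace l).reverse :=
    dropWhile_exists _ _ x (List.mem_reverse.mpr h1) hpx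
  intro hcontra
  rw [List.reverse_eq_nil_iff] at hcontra
  rw [hcontra] at h2
  cases h2

lemma wtWrapAll_ne_nil (per : Int) (ws : List (List Char)) (current : List Char)
    (hg : wtGood ws) (h : current ≠ [] ∨ ws ≠ []) : wtWrapAll per ws current ≠ [] := by
  induction ws generalizing current with
  | nil =>
    rcases h with h | h
    · simp [wtWrapAll, h]
    · exact absurd rfl h
  | cons w ws' ih =>
    obtain ⟨hw, hwc⟩ := hg w (by simp)
    have hg' : wtGood ws' := fun v hv => hg v (by simp [hv])
    rw [wtWrapAll]
    by_cases h1 : current ≠ []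
    · rw [if_pos h1]
      by_cases h2 : ((PySem.Chars.strip (current ++ ' ' :: w)).length : Int) ≤ per
      · rw [if_pos h2]
        refine ih _ hg' (Or.inl ?_)
        obtain ⟨x, hx⟩ := List.exists_mem_of_ne_nil w hw
        exact strip_ne_nil _ x (by simp [hx]) (hwc x hx)
      · rw [if_neg h2]; simp
    · rw [if_neg h1]
      by_cases h3 : ((w.length : Int) ≤ per)
      · rw [if_pos h3]
        exact ih _ hg' (Or.inl hw)
      · rw [if_neg h3]; simp

-- pulling the flushed `current` out of phase 1 when the candidate does not fit
lemma wtWrapAll_flush (per : Int) (ws' : List (List Char)) (w current : List Char)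
    (hc : current ≠ [])
    (hlong : ¬ ((PySem.Chars.strip (current ++ ' ' :: w)).length : Int) ≤ per) :
    wtWrapAll per (w :: ws') current = current :: wtWrapAll per (w :: ws') [] := by
  conv_lhs => rw [wtWrapAll]
  conv_rhs => rw [wtWrapAll]
  rw [if_pos hc, if_neg hlong]
  simp

-- the main invariant: A's interleaved loop + post-processing equals
-- B's truncation applied to `lines` followed by the unlimited wrap of the remaining words
lemma wt_main (per max : Int) (ws lines : List (List Char)) (current : List Char) :
    wtGood ws → lines.length ≤ max.toNat → (current ≠ [] → (lines.length : Int) < max) →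
    wtFinishA per max (wtLoopA per max ws lines current)
      = wtFinishB per max (lines ++ wtWrapAll per ws current) := by
  induction ws, lines, current using wtLoopA.induct per max with
  | case1 lines current =>
    intro _ hlen hc
    rw [wtLoopA, wtWrapAll]
    by_cases hcur : current ≠ []
    · have hlt := hc hcur
      rw [if_pos hcur]
      unfold wtFinishA wtLines2 wtFinishB
      rw [if_pos (⟨hcur, hlt⟩ : ((lines, current, ([] : List (List Char))).2.1 ≠ []
            ∧ ((lines, current, ([] : List (List Char))).1.length : Int) < max))]
      rw [if_neg (by simp)]
      rw [if_neg (by omega)]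
      rw [if_neg (by simp only [List.length_append, List.length_cons,
            List.length_nil]; push_cast; omega)]
    · have hc0 : current = [] := by simpa using hcur
      subst hc0
      rw [if_neg (by simp), List.append_nil]
      have hl2 : wtLines2 max (lines, ([] : List Char), ([] : List (List Char))) = lines := by
        unfold wtLines2; rw [if_neg (by simp)]
      have hA : wtFinishA per max (lines, ([] : List Char), ([] : List (List Char)))
          = lines := by
        unfold wtFinishA; rw [hl2, if_neg (by simp)]
      rw [hA]
      unfold wtFinishB
      by_cases hm : max ≤ 0
      · have hl : lines = [] := by
          have h0 : lines.length = 0 := by omega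
          simpa [List.length_eq_zero_iff] using h0
        rw [hl, if_pos hm]
      · rw [if_neg hm, if_neg (by omega)]
  | case2 lines current w ws' h1 h2 ih =>
    intro hg hlen hc
    rw [wtLoopA, if_pos h1, if_pos h2]
    have hB : wtWrapAll per (w :: ws') current = wtWrapAll per ws' (wtCand current w) := by
      rw [wtWrapAll]
      by_cases hcur : current ≠ []
      · have e : PySem.Chars.strip (current ++ ' ' :: w) = wtCand current w := by
          simp [wtCand, hcur]
        rw [if_pos hcur, e, if_pos h2]
      · have e : wtCand current w = w := by simp [wtCand, hcur]
        have h2' : ((w.length : Int) ≤ per) := by rw [e] at h2; exact h2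
        rw [if_neg hcur, if_pos h2', e]
    rw [hB]
    exact ih (fun v hv => hg v (by simp [hv])) hlen (fun _ => h1)
  | case3 lines current w ws' h1 h2 h3 ih =>
    intro hg hlen hc
    rw [wtLoopA, if_pos h1, if_neg h2, if_pos h3]
    have hlong : ¬ ((PySem.Chars.strip (current ++ ' ' :: w)).length : Int) ≤ per := by
      have e : wtCand current w = PySem.Chars.strip (current ++ ' ' :: w) := by
        simp [wtCand, h3]
      rw [← e]; exact h2
    rw [wtWrapAll_flush per ws' w current h3 hlong]
    rw [show lines ++ current :: wtWrapAll per (w :: ws') [] =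
        (lines ++ [current]) ++ wtWrapAll per (w :: ws') [] by simp]
    refine ih hg ?_ (by simp)
    simp only [List.length_append, List.length_cons, List.length_nil]
    omega
  | case4 lines current w ws' h1 h2 h3 ih =>
    intro hg hlen hc
    have hc0 : current = [] := by simpa using h3
    subst hc0
    rw [wtLoopA, if_pos h1, if_neg h2, if_neg h3]
    have hwfit : ¬ ((w.length : Int) ≤ per) := by
      have e : wtCand ([] : List Char) w = w := by simp [wtCand]
      rw [e] at h2; exact h2
    have hB : wtWrapAll per (w :: ws') [] = wtBreak per w :: wtWrapAll per ws' [] := by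
      rw [wtWrapAll, if_neg (by simp), if_neg hwfit]
    rw [hB]
    rw [show lines ++ wtBreak per w :: wtWrapAll per ws' [] =
        (lines ++ [wtBreak per w]) ++ wtWrapAll per ws' [] by simp]
    refine ih (fun v hv => hg v (by simp [hv])) ?_ (by simp)
    simp only [List.length_append, List.length_cons, List.length_nil]
    omega
  | case5 lines current w ws' h1 =>
    intro hg hlen hc
    have hc0 : current = [] := by
      by_contra hne
      exact h1 (hc hne)
    subst hc0
    rw [wtLoopA, if_neg h1]
    by_cases hm : max ≤ 0
    · have hl : lines = [] := by
        have h0 : lines.length = 0 := by omega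
        simpa [List.length_eq_zero_iff] using h0
      subst hl
      unfold wtFinishA wtLines2 wtFinishB
      simp [hm]
    · have hlen' : (lines.length : Int) = max := by omega
      have hlnil : lines ≠ [] := by
        intro h; subst h; simp at hlen'; omega
      have hrest : wtWrapAll per (w :: ws') [] ≠ [] :=
        wtWrapAll_ne_nil per (w :: ws') [] hg (Or.inr (by simp))
      have hl2 : wtLines2 max (lines, ([] : List Char), w :: ws') = lines := by
        unfold wtLines2; rw [if_neg (by simp)]
      have hA : wtFinishA per max (lines, ([] : List Char), w :: ws')
          = truncEllipsis per lines := by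
        unfold wtFinishA; rw [hl2, if_pos ⟨by simp, hlnil⟩]
      rw [hA]
      unfold wtFinishB
      rw [if_neg hm]
      have hfull : max < ((lines ++ wtWrapAll per (w :: ws') []).length : Int) := by
        rcases List.exists_mem_of_ne_nil _ hrest with ⟨x, hx⟩
        have hp := List.length_pos_of_mem hx
        simp only [List.length_append]
        push_cast
        omega
      rw [if_pos hfull]
      congr 1
      rw [PySem.List.slice_to _ (by omega)]
      rw [show max.toNat = lines.length from by omega, List.take_left]

-- ===== VERDICT (by name: the statement is the Claim_ definition above) =====
theorem wrap_title_spec : Claim_equal_wrap_title := by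
  intro text per_line max_lines _
  unfold Spec_wrap_title wrap_title wrap_title_alt
  have h := wt_main per_line max_lines (PySem.Chars.split₀ text.toList) [] []
    (wtGood_split₀ _) (by simp) (by simp)
  simp only [List.nil_append] at h
  simp only [h]
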